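-- pv_equiv track=rewrite | github.com/spektre-labs/creation-os | hypervec/swarm.py | _shard_ranges
-- ===== SOURCE A (Python) =====
-- def _shard_ranges(size: int, agents: int) -> list[tuple[int, int]]:
--     if agents <= 0 or size <= 0:
--         return []
--     agents = min(agents, max(1, size))
--     base = size // agents
--     rem = size % agents
--     out: list[tuple[int, int]] = []
--     pos = 0
--     for i in range(agents):
--         span = base + (1 if i < rem else 0)
--         end = pos + span
--         if span > 0:
--             out.append((pos, end))
--         pos = end
--     return out
-- ===== SOURCE B (Python) =====
-- def _shard_ranges(size: int, agents: int) -> list[tuple[int, int]]: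
--     if agents <= 0 or size <= 0:
--         return []
--     agents = min(agents, max(1, size))
--     base = size // agents
--     rem = size % agents
--     return [(i * base + min(i, rem), (i + 1) * base + min(i + 1, rem))
--             for i in range(agents)]
-- ===== Notes on version B (the rewrite author's own statement) =====
-- stated objective: simpler
-- what changed: Replaces the running pos cursor and the span>0 filter with a direct closed form: range i is (i*base+min(i,rem), (i+1)*base+min(i+1,rem)), emitted by a list comprehension; since the clamp guarantees base>=1, every span is positive and the filter is provably redundant.
import Mathlib
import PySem

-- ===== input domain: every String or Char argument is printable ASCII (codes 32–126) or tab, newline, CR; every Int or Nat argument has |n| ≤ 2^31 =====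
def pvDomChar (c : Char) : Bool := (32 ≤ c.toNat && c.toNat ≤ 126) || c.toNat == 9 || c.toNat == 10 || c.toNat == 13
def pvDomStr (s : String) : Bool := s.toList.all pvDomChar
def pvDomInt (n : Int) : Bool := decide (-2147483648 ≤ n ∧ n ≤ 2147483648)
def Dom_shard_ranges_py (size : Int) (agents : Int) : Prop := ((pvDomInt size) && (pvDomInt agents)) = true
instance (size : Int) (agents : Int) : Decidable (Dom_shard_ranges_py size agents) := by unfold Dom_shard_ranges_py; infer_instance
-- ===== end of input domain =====

-- B replaces A's running `pos` cursor and `span > 0` filter with a per-index closed form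
-- (start = i*base + min(i,rem)); objective: simpler.

-- ===== PORT A =====
def shard_ranges_py (size : Int) (agents : Int) : List (Int × Int) :=
  if agents ≤ 0 ∨ size ≤ 0 then []
  else
    let agents' := min agents (max 1 size)
    let base := PySem.Int.floordiv size agents'
    let rem := PySem.Int.mod size agents'
    let st := (PySem.List.pyRange 0 agents' 1).foldl
      (fun (st : List (Int × Int) × Int) i =>
        let span := base + (if i < rem then 1 else 0)
        let e := st.2 + span
        (if span > 0 then st.1 ++ [(st.2, e)] else st.1, e)) ([], 0)
    st.1

-- ===== PORT B =====
def shard_ranges_py_alt (size : Int) (agents : Int) : List (Int × Int) :=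
  if agents ≤ 0 ∨ size ≤ 0 then []
  else
    let agents' := min agents (max 1 size)
    let base := PySem.Int.floordiv size agents'
    let rem := PySem.Int.mod size agents'
    (PySem.List.pyRange 0 agents' 1).map
      (fun i => (i * base + min i rem, (i + 1) * base + min (i + 1) rem))

-- ===== PRECONDITION & SPEC =====
def Spec_shard_ranges_py (size : Int) (agents : Int) (out : List (Int × Int)) : Prop := out = shard_ranges_py_alt size agents
instance (size : Int) (agents : Int) (out : List (Int × Int)) : Decidable (Spec_shard_ranges_py size agents out) := by unfold Spec_shard_ranges_py; infer_instance

-- ===== CLAIM (what is proved, stated in full; the proofs are below) =====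
def Claim_equal_shard_ranges_py : Prop := ∀ (size : Int) (agents : Int), Dom_shard_ranges_py size agents → Spec_shard_ranges_py size agents (shard_ranges_py size agents)

-- ===== LEMMAS AND PROOFS =====

-- Loop invariant: after processing 0..n-1 the accumulator holds the closed-form
-- ranges for those indices and pos = n*base + min n rem.
theorem shard_fold_invariant (base rem : Int) (hb : 1 ≤ base) (hr : 0 ≤ rem) (n : Nat) :
    (PySem.List.pyRange 0 (n : Int) 1).foldl
      (fun (st : List (Int × Int) × Int) i =>
        (if base + (if i < rem then 1 else 0) > 0 then
            st.1 ++ [(st.2, st.2 + (base + (if i < rem then 1 else 0)))]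
          else st.1,
         st.2 + (base + (if i < rem then 1 else 0)))) ([], 0)
    = ((PySem.List.pyRange 0 (n : Int) 1).map
        (fun i => (i * base + min i rem, (i + 1) * base + min (i + 1) rem)),
       (n : Int) * base + min (n : Int) rem) := by
  induction n with
  | zero =>
      simp only [Int.natCast_zero, PySem.List.pyRange_one_eq_nil le_rfl, List.foldl_nil,
        List.map_nil, Prod.mk.injEq, zero_mul, zero_add, true_and]
      omega
  | succ m ih =>
      have hm : (0 : Int) ≤ (m : Int) := by positivity
      have hsplit : PySem.List.pyRange 0 ((m : Int) + 1) 1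
          = PySem.List.pyRange 0 (m : Int) 1 ++ [(m : Int)] :=
        PySem.List.pyRange_one_succ_right hm
      push_cast
      rw [hsplit, List.foldl_append, List.map_append, ih]
      simp only [List.foldl_cons, List.foldl_nil, List.map_cons, List.map_nil]
      have hspan : base + (if (m : Int) < rem then 1 else 0) > 0 := by
        split_ifs <;> omega
      have key : (m : Int) * base + min (m : Int) rem + (base + (if (m : Int) < rem then 1 else 0))
          = ((m : Int) + 1) * base + min ((m : Int) + 1) rem := by
        split_ifs with h
        · rw [min_eq_left (by omega), min_eq_left (by omega)]; ring
        · rw [min_eq_right (by omega), min_eq_right (by omega)]; ring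
      rw [if_pos hspan, key]

theorem shard_ranges_eq (size agents : Int) :
    shard_ranges_py size agents = shard_ranges_py_alt size agents := by
  unfold shard_ranges_py shard_ranges_py_alt
  split_ifs with h
  · rfl
  · push Not at h
    obtain ⟨ha, hs⟩ := h
    set a := min agents (max 1 size) with hadef
    have ha1 : 1 ≤ a := by
      simp only [hadef]
      omega
    have has : a ≤ size := by
      simp only [hadef]
      omega
    have hapos : (0 : Int) < a := by omega
    have hbase : 1 ≤ PySem.Int.floordiv size a := by
      rw [PySem.Int.le_floordiv_iff_mul_le hapos]; omega
    have hrem : 0 ≤ PySem.Int.mod size a := PySem.Int.mod_nonneg size hapos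
    have hcast : a = ((a.toNat : Nat) : Int) := by omega
    simp only []
    rw [hcast] at hbase hrem ⊢
    rw [shard_fold_invariant _ _ hbase hrem a.toNat]

-- ===== VERDICT (by name: the statement is the Claim_ definition above) =====
theorem shard_ranges_py_spec : Claim_equal_shard_ranges_py := by
  intro size agents _
  exact shard_ranges_eq size agents
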